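-- pv_equiv track=rewrite | github.com/Tylody/tylody-leetcode | minimum_window_with_characters.py | check_if_contains
-- ===== SOURCE A (Python) =====
-- def check_if_contains(tDict: dict, window: str) -> bool:
--     contains_substring = True
--
--     windowDict = {}
--     for i in window:
--         windowDict[i] = windowDict.get(i, 0) + 1
--
--     for i in tDict:
--         if windowDict.get(i, 0) < tDict[i]:
--             contains_substring = False
--             break
--
--     return contains_substring
-- ===== SOURCE B (Python) =====
-- def check_if_contains(tDict: dict, window: str) -> bool:
--     return all(sum(1 for ch in window if ch == k) >= v for k, v in tDict.items())
-- ===== Notes on version B (the rewrite author's own statement) =====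
-- stated objective: simpler
-- what changed: Dropped the precomputed windowDict and the break-driven loop; B checks each required (key, count) of tDict directly by a per-key scan of the window inside one all(...) expression.
import Mathlib
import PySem

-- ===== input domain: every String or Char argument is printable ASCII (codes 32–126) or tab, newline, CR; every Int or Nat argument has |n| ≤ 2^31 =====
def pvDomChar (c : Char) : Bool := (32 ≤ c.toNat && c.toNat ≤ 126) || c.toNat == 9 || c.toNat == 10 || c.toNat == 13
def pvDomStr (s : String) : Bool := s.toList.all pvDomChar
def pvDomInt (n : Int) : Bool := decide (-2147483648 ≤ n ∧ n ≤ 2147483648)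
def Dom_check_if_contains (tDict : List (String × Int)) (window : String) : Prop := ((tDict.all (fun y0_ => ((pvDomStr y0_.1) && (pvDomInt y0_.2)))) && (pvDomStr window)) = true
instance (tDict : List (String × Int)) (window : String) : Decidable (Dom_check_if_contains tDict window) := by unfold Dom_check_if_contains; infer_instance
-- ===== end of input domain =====

-- B drops the precomputed windowDict: it checks each requirement of tDict by a direct per-key scan of the window (objective: simpler).

-- ===== PORT A =====
-- the 'for i in tDict: if …: contains_substring = False; break' loop, over the keys, looking both counts up
def pvCheckLoopA (td wd : PySem.Dict String Int) : List String → Bool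
  | [] => true
  | k :: rest => if wd.getD k 0 < td.getD k 0 then false else pvCheckLoopA td wd rest

def check_if_contains (tDict : List (String × Int)) (window : String) : Bool :=
  let windowDict : PySem.Dict String Int :=
    window.toList.foldl (fun d c => d.insert (toString c) (d.getD (toString c) 0 + 1)) PySem.Dict.empty
  pvCheckLoopA (PySem.Dict.mk tDict) windowDict (tDict.map Prod.fst)

-- ===== PORT B =====
def check_if_contains_alt (tDict : List (String × Int)) (window : String) : Bool :=
  tDict.all (fun kv => decide (kv.2 ≤ (window.toList.countP (fun ch => toString ch == kv.1) : Int)))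

-- ===== PRECONDITION & SPEC =====
-- Pre_ excludes association lists with duplicate keys: a Python dict cannot hold duplicate keys
-- (dict() collapses them, last value wins), so such lists do not denote any input A is ever called on.
def Pre_check_if_contains (tDict : List (String × Int)) (window : String) : Prop :=
  (tDict.map Prod.fst).Nodup
instance (tDict : List (String × Int)) (window : String) : Decidable (Pre_check_if_contains tDict window) := by unfold Pre_check_if_contains; infer_instance
def pvWitness_check_if_contains : (List (String × Int)) × String := ([("a", 1), ("b", 2)], "abba")

def Spec_check_if_contains (tDict : List (String × Int)) (window : String) (out : Bool) : Prop := out = check_if_contains_alt tDict window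
instance (tDict : List (String × Int)) (window : String) (out : Bool) : Decidable (Spec_check_if_contains tDict window out) := by unfold Spec_check_if_contains; infer_instance

-- ===== CLAIM (what is proved, stated in full; the proofs are below) =====
def Claim_equal_check_if_contains : Prop := ∀ (tDict : List (String × Int)) (window : String), Dom_check_if_contains tDict window → Pre_check_if_contains tDict window → Spec_check_if_contains tDict window (check_if_contains tDict window)

-- ===== LEMMAS AND PROOFS =====

-- A's break-driven loop is an all over the keys
theorem pvCheckLoopA_eq_all (td wd : PySem.Dict String Int) (ks : List String) :
    pvCheckLoopA td wd ks = ks.all (fun k => !(wd.getD k 0 < td.getD k 0)) := by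
  induction ks with
  | nil => rfl
  | cons k rest ih =>
      simp only [pvCheckLoopA, List.all_cons, ih]
      by_cases h : wd.getD k 0 < td.getD k 0 <;> simp [h]

-- the windowDict lookup is a character count
theorem pvWindowDict_getD (window : String) (k : String) :
    (window.toList.foldl (fun d c => d.insert (toString c) (d.getD (toString c) 0 + 1))
        (PySem.Dict.empty : PySem.Dict String Int)).getD k 0
      = (window.toList.countP (fun ch => toString ch == k) : Int) := by
  rw [← List.foldl_map (f := toString)
        (g := fun (d : PySem.Dict String Int) s => d.insert s (d.getD s 0 + 1))]
  rw [PySem.Dict.getD_foldl_insert_add_one]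
  simp [List.count, List.countP_map, PySem.Dict.getD_empty]
  rfl

theorem check_if_contains_spec' (tDict : List (String × Int)) (window : String)
    (hpre : (tDict.map Prod.fst).Nodup) :
    check_if_contains tDict window = check_if_contains_alt tDict window := by
  unfold check_if_contains check_if_contains_alt
  rw [pvCheckLoopA_eq_all, List.all_map, Bool.eq_iff_iff]
  simp only [List.all_eq_true]
  refine forall_congr' (fun kv => forall_congr' (fun hkv => ?_))
  have hk : (PySem.Dict.mk tDict).getD kv.1 0 = kv.2 :=
    PySem.Dict.getD_of_mem_items (d := PySem.Dict.mk tDict) (by simpa using hkv) (by simpa using hpre) 0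
  simp only [Function.comp_apply, hk, pvWindowDict_getD]
  by_cases h : kv.2 ≤ (window.toList.countP (fun ch => toString ch == kv.1) : Int) <;>
    simp [h]

-- ===== VERDICT (by name: the statement is the Claim_ definition above) =====
theorem check_if_contains_spec : Claim_equal_check_if_contains := by
  intro tDict window _ hpre
  exact check_if_contains_spec' tDict window hpre
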